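-- pv_equiv track=rewrite | github.com/locbp-uzh/biopipelines | HelpScripts/pdb_parser.py | format_pymol_ranges
-- ===== SOURCE A (Python) =====
-- from typing import List, Dict, Any, Optional, Tuple, NamedTuple, Set
--
-- def format_pymol_ranges(residue_numbers: List[int]) -> str:
--     """
--     Format a list of residue numbers as a compact ``start-end+...`` string.
--
--     Inverse of :func:`parse_pymol_ranges` (but takes a flat list of ints
--     rather than tuples).
--
--     Args:
--         residue_numbers: List of residue numbers
--
--     Returns:
--         Selection string with merged ranges (e.g., ``"10-11+15"``)
--     """
--     if not residue_numbers:
--         return ""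
--
--     res_nums = sorted(set(residue_numbers))
--     ranges: List[str] = []
--     start = res_nums[0]
--     end = res_nums[0]
--
--     for i in range(1, len(res_nums)):
--         if res_nums[i] == end + 1:
--             end = res_nums[i]
--         else:
--             if start == end:
--                 ranges.append(f"{start}")
--             else:
--                 ranges.append(f"{start}-{end}")
--             start = end = res_nums[i]
--
--     # Final range
--     if start == end:
--         ranges.append(f"{start}")
--     else:
--         ranges.append(f"{start}-{end}")
--
--     return "+".join(ranges)
-- ===== SOURCE B (Python) =====
-- from itertools import groupby
-- from typing import List
--
-- def format_pymol_ranges(residue_numbers: List[int]) -> str: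
--     if not residue_numbers:
--         return ""
--     res_nums = sorted(set(residue_numbers))
--     parts: List[str] = []
--     for _, grp in groupby(enumerate(res_nums), key=lambda p: p[1] - p[0]):
--         vals = [v for _, v in grp]
--         lo, hi = vals[0], vals[-1]
--         parts.append(f"{lo}" if lo == hi else f"{lo}-{hi}")
--     return "+".join(parts)
-- ===== Notes on version B (the rewrite author's own statement) =====
-- stated objective: idiomatic
-- what changed: Replaces the explicit start/end break-detection loop with itertools.groupby keyed on value-minus-index, so maximal consecutive runs are collected as groups and formatted from their first and last elements.
import Mathlib
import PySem

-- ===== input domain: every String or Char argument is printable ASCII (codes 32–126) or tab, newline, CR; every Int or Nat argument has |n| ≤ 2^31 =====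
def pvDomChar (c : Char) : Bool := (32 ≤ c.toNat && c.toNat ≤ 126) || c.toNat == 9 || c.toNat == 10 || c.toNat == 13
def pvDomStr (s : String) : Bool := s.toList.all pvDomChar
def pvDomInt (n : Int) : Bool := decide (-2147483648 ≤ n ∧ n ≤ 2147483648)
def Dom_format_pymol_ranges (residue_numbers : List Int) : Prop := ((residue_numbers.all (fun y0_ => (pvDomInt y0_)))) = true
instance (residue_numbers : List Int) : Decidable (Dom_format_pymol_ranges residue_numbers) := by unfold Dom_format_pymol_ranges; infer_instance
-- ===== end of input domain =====

-- B replaces A's explicit start/end break-detection loop by grouping enumerate(sorted set)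
-- on the key value-minus-index (itertools.groupby) and formatting each group from its
-- first and last elements (objective: more idiomatic decomposition; same cost).

-- ===== PORT A =====
-- step of A's for-loop: state is (ranges, start, end)
def pvAStep (acc : List String × Int × Int) (x : Int) : List String × Int × Int :=
  let (ranges, start, e) := acc
  if x == e + 1 then (ranges, start, x)
  else
    (ranges ++ [if start == e then PySem.Int.toStr start
                else PySem.Int.toStr start ++ "-" ++ PySem.Int.toStr e], x, x)

def format_pymol_ranges (residue_numbers : List Int) : String :=
  if residue_numbers = [] then ""
  else
    let res_nums := PySem.List.sorted (PySem.Set.ofList residue_numbers) (fun x => x) false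
    match res_nums with
    | [] => ""   -- unreachable: sorted(set(..)) of a nonempty list is nonempty
    | r0 :: rest =>
      let st := rest.foldl pvAStep ([], r0, r0)
      PySem.Str.join "+"
        (st.1 ++ [if st.2.1 == st.2.2 then PySem.Int.toStr st.2.1
                  else PySem.Int.toStr st.2.1 ++ "-" ++ PySem.Int.toStr st.2.2])

-- ===== PORT B =====
-- itertools.groupby with key p ↦ p.2 - p.1, specialised to (index, value) pairs:
-- splits the list into maximal runs of consecutive pairs with equal key.
def pvGroupby : List (Int × Int) → List (List (Int × Int))
  | [] => []
  | p :: rest =>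
    match pvGroupby rest with
    | [] => [[p]]
    | g :: gs =>
      match g with
      | [] => [[p]]   -- unreachable: groups are nonempty
      | q :: _ => if p.2 - p.1 == q.2 - q.1 then (p :: g) :: gs else [p] :: g :: gs

-- per-group formatting: vals = [v for _, v in grp]; lo, hi = vals[0], vals[-1]
def pvFmtGroup (g : List (Int × Int)) : String :=
  let vals := g.map Prod.snd
  let lo := vals.headD 0
  let hi := vals.getLastD 0
  if lo == hi then PySem.Int.toStr lo
  else PySem.Int.toStr lo ++ "-" ++ PySem.Int.toStr hi

def format_pymol_ranges_alt (residue_numbers : List Int) : String :=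
  if residue_numbers = [] then ""
  else
    let res_nums := PySem.List.sorted (PySem.Set.ofList residue_numbers) (fun x => x) false
    let parts := (pvGroupby (PySem.List.enumerate res_nums 0)).map pvFmtGroup
    PySem.Str.join "+" parts

-- ===== PRECONDITION & SPEC =====
def Spec_format_pymol_ranges (residue_numbers : List Int) (out : String) : Prop := out = format_pymol_ranges_alt residue_numbers
instance (residue_numbers : List Int) (out : String) : Decidable (Spec_format_pymol_ranges residue_numbers out) := by unfold Spec_format_pymol_ranges; infer_instance

-- ===== CLAIM (what is proved, stated in full; the proofs are below) =====
def Claim_equal_format_pymol_ranges : Prop := ∀ (residue_numbers : List Int), Dom_format_pymol_ranges residue_numbers → Spec_format_pymol_ranges residue_numbers (format_pymol_ranges residue_numbers)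

-- ===== LEMMAS AND PROOFS =====

-- common characterisation: the (start, end) pairs of the maximal consecutive runs
def pvRuns (s e : Int) : List Int → List (Int × Int)
  | [] => [(s, e)]
  | x :: xs => if x = e + 1 then pvRuns s x xs else (s, e) :: pvRuns x x xs

def pvFmt (p : Int × Int) : String :=
  if p.1 == p.2 then PySem.Int.toStr p.1
  else PySem.Int.toStr p.1 ++ "-" ++ PySem.Int.toStr p.2

-- A's loop computes exactly the run list
theorem pvA_runs (xs : List Int) : ∀ (ranges : List String) (s e : Int),
    (let st := xs.foldl pvAStep (ranges, s, e);
     st.1 ++ [pvFmt (st.2.1, st.2.2)]) = ranges ++ (pvRuns s e xs).map pvFmt := by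
  induction xs with
  | nil => intro ranges s e; simp [pvRuns, pvFmt]
  | cons x xs ih =>
    intro ranges s e
    by_cases h : x = e + 1
    · simpa [pvAStep, pvRuns, h] using ih ranges s x
    · simpa [pvAStep, pvRuns, pvFmt, h] using ih (ranges ++ [pvFmt (s, e)]) x x

-- groups are nonempty and start with the head pair
theorem pvGroupby_cons (p : Int × Int) (l : List (Int × Int)) :
    ∃ g' gs, pvGroupby (p :: l) = (p :: g') :: gs := by
  unfold pvGroupby
  match hl : pvGroupby l with
  | [] => exact ⟨[], [], rfl⟩
  | [] :: gs => exact ⟨[], [], rfl⟩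
  | (q :: g) :: gs =>
    by_cases h : p.2 - p.1 = q.2 - q.1
    · exact ⟨q :: g, gs, by simp [h]⟩
    · exact ⟨[], (q :: g) :: gs, by simp [h]⟩

def pvBounds (g : List (Int × Int)) : Int × Int :=
  ((g.map Prod.snd).headD 0, (g.map Prod.snd).getLastD 0)

theorem pvFmtGroup_eq (g : List (Int × Int)) : pvFmtGroup g = pvFmt (pvBounds g) := by
  simp [pvFmtGroup, pvBounds, pvFmt]

-- B's groups have exactly the run bounds
theorem pvRuns_cons_shape (xs : List Int) : ∀ (s s' e : Int),
    pvRuns s' e xs = (s', ((pvRuns s e xs).headD (0, 0)).2) :: (pvRuns s e xs).tail := by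
  induction xs with
  | nil => intro s s' e; simp [pvRuns]
  | cons y ys ihy =>
    intro s s' e
    by_cases hy : y = e + 1
    · rw [show pvRuns s' e (y :: ys) = pvRuns s' y ys from by simp [pvRuns, hy],
          show pvRuns s e (y :: ys) = pvRuns s y ys from by simp [pvRuns, hy]]
      exact ihy s s' y
    · simp [pvRuns, hy]

theorem pvBounds_cons_cons (p q : Int × Int) (t : List (Int × Int)) :
    pvBounds (p :: q :: t) = (p.2, (pvBounds (q :: t)).2) := by
  simp only [pvBounds, List.map_cons, List.headD_cons]
  induction t generalizing q with
  | nil => simp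
  | cons r t _ => simp

theorem pvB_runs (xs : List Int) : ∀ (k s : Int),
    (pvGroupby (PySem.List.enumerate (s :: xs) k)).map pvBounds = pvRuns s s xs := by
  induction xs with
  | nil => intro k s; simp [PySem.List.enumerate_cons, PySem.List.enumerate_nil,
      pvGroupby, pvRuns, pvBounds]
  | cons x xs ih =>
    intro k s
    obtain ⟨g', gs, hg⟩ := pvGroupby_cons (k + 1, x) (PySem.List.enumerate xs (k + 1 + 1))
    have ihk := ih (k + 1) x
    rw [PySem.List.enumerate_cons, hg, List.map_cons] at ihk
    rw [PySem.List.enumerate_cons, PySem.List.enumerate_cons]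
    by_cases h : x = s + 1
    · -- same key: s joins the first group
      have hkey : s - k = x - (k + 1) := by omega
      show (pvGroupby ((k, s) :: (k + 1, x) :: PySem.List.enumerate xs (k + 1 + 1))).map pvBounds = _
      unfold pvGroupby
      rw [hg]
      simp only [hkey, beq_self_eq_true, if_true, List.map_cons]
      rw [show pvRuns s s (x :: xs) = pvRuns s x xs from by simp [pvRuns, h]]
      rw [pvRuns_cons_shape xs x x x] at ihk
      have h2 : pvBounds ((k + 1, x) :: g') = (x, ((pvRuns x x xs).headD (0, 0)).2) := by
        have := congrArg (fun l => l.headD ((0 : Int), (0 : Int))) ihk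
        simpa using this
      have h3 : gs.map pvBounds = (pvRuns x x xs).tail := by
        have := congrArg List.tail ihk
        simpa using this
      rw [pvBounds_cons_cons, h2, h3, pvRuns_cons_shape xs x s x]
    · -- key breaks: s is alone in its group
      have hkey : (s - k == x - (k + 1)) = false := by simp; omega
      show (pvGroupby ((k, s) :: (k + 1, x) :: PySem.List.enumerate xs (k + 1 + 1))).map pvBounds = _
      unfold pvGroupby
      rw [hg]
      simp only [hkey]
      rw [show pvRuns s s (x :: xs) = (s, s) :: pvRuns x x xs from by simp [pvRuns, h]]
      rw [← ihk]
      simp [pvBounds]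

-- sorted(set(l)) of a nonempty list is nonempty
theorem pv_sorted_set_ne (l : List Int) (h : l ≠ []) :
    PySem.List.sorted (PySem.Set.ofList l) (fun x => x) false ≠ [] := by
  intro hc
  rw [PySem.List.sorted_eq_nil_iff] at hc
  cases l with
  | nil => exact h rfl
  | cons a l =>
    have : a ∈ PySem.Set.ofList (a :: l) := by
      rw [PySem.Set.mem_ofList]; simp
    rw [hc] at this; simp at this

-- ===== VERDICT (by name: the statement is the Claim_ definition above) =====
theorem format_pymol_ranges_spec : Claim_equal_format_pymol_ranges := by
  intro l _
  show format_pymol_ranges l = format_pymol_ranges_alt l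
  unfold format_pymol_ranges format_pymol_ranges_alt
  by_cases h : l = []
  · simp [h]
  · match hs : PySem.List.sorted (PySem.Set.ofList l) (fun x => x) false with
    | [] => exact absurd hs (pv_sorted_set_ne l h)
    | r0 :: rest =>
      simp only [if_neg h]
      congr 1
      have hmap : (pvGroupby (PySem.List.enumerate (r0 :: rest) 0)).map pvFmtGroup
          = ((pvGroupby (PySem.List.enumerate (r0 :: rest) 0)).map pvBounds).map pvFmt := by
        simp [List.map_map, Function.comp_def, pvFmtGroup_eq]
      rw [hmap, pvB_runs rest 0 r0]
      have hA := pvA_runs rest [] r0 r0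
      simp only [List.nil_append] at hA
      exact hA
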